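-- pv_equiv track=rewrite | github.com/merab235/Algorithme-2e-semestre | lab1/lab_18/src/task18.py | min_cost_lunches
-- ===== SOURCE A (Python) =====
-- def min_cost_lunches(n, costs):
--     dp = [[float('inf')] * (n + 1) for _ in range(n + 1)]
--     dp[0][0] = 0
--
--     for i in range(n):
--         for j in range(n):
--             if dp[i][j] != float('inf'):
--                 dp[i + 1][j] = min(dp[i + 1][j], dp[i][j] + costs[i])
--                 if j > 0:
--                     dp[i + 1][j - 1] = min(dp[i + 1][j - 1], dp[i][j])
--                 if costs[i] > 100:
--                     dp[i + 1][j + 1] = min(dp[i + 1][j + 1], dp[i][j] + costs[i])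
--
--     return min(dp[n][j] for j in range(n + 1))
-- ===== SOURCE B (Python) =====
-- def min_cost_lunches(n, costs):
--     # Backward DP on "min cost of the remaining suffix given j earned credits":
--     # dense triangular rows of plain ints, no infinity sentinels, no final scan.
--     row = [0] * (n + 1)
--     for i in range(n - 1, -1, -1):
--         c = costs[i]
--         nxt = []
--         for j in range(i + 1):
--             best = row[j] + c
--             if j > 0:
--                 best = min(best, row[j - 1])
--             if c > 100:
--                 best = min(best, row[j + 1] + c)
--             nxt.append(best)
--         row = nxt
--     return row[0]
-- ===== Notes on version B (the rewrite author's own statement) =====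
-- stated objective: alternative
-- what changed: Replaces the forward push-style DP over a full (n+1)x(n+1) matrix seeded with float('inf') (plus a final min-scan of the last row) by a backward suffix-value DP that keeps only one dense triangular row of plain ints per step and reads the answer directly at row[0].
import Mathlib
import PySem

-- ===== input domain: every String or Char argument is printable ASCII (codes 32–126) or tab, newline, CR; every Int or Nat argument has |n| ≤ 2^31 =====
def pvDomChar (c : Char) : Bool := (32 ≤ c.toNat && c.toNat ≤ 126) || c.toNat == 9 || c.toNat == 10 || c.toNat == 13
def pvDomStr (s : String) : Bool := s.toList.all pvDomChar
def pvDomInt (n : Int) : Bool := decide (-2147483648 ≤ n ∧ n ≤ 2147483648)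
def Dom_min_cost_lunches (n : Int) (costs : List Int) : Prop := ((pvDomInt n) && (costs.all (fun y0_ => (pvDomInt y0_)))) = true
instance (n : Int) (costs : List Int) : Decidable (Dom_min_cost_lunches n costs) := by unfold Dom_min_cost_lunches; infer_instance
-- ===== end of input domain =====

-- B replaces A's forward push DP over a full (n+1)×(n+1) float('inf') matrix by a
-- backward suffix-value DP on one dense triangular row of ints (answer read at row[0]).

-- ===== PORT A =====
-- float('inf') is modelled as `none`: the Python table only holds ints reached from
-- dp[0][0] = 0 plus the untouched inf sentinel (never arithmetic on inf), so this is exact.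
def pvOMin (a b : Option Int) : Option Int :=
  match a, b with
  | none, b => b
  | some x, none => some x
  | some x, some y => some (min x y)

-- body of A's inner loop over j (reads dp[i][j], min-updates row i+1)
def pvInner (c : Int) (i : Nat) (m : List (List (Option Int))) (j : Nat) : List (List (Option Int)) :=
  match (m.getD i []).getD j none with
  | none => m
  | some v =>
    let m1 := m.modify (i+1) (fun row => row.modify j (fun old => pvOMin old (some (v + c))))
    let m2 := if 0 < j then m1.modify (i+1) (fun row => row.modify (j-1) (fun old => pvOMin old (some v))) else m1
    if 100 < c then m2.modify (i+1) (fun row => row.modify (j+1) (fun old => pvOMin old (some (v + c)))) else m2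

def min_cost_lunches (n : Int) (costs : List Int) : Int :=
  let N := n.toNat
  let dp0 := (List.replicate (N+1) (List.replicate (N+1) (none : Option Int))).modify 0
               (fun row => row.modify 0 (fun _ => some (0:Int)))
  let dp := (List.range N).foldl (fun m i => (List.range N).foldl (pvInner (costs.getD i 0) i) m) dp0
  ((List.range (N+1)).foldl (fun acc j => pvOMin acc ((dp.getD N []).getD j none)) none).getD 0

-- ===== PORT B =====
-- one step of B's backward DP: from the row of suffix values at position i+1 to the row at i
def pvNextRow (c : Int) (row : List Int) (i : Nat) : List Int :=
  (List.range (i+1)).map (fun j =>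
    let b1 := row.getD j 0 + c
    let b2 := if 0 < j then min b1 (row.getD (j-1) 0) else b1
    if 100 < c then min b2 (row.getD (j+1) 0 + c) else b2)

def min_cost_lunches_alt (n : Int) (costs : List Int) : Int :=
  let N := n.toNat
  ((List.range N).reverse.foldl (fun row i => pvNextRow (costs.getD i 0) row i)
      (List.replicate (N+1) (0:Int))).getD 0 0

-- ===== PRECONDITION & SPEC =====
-- Pre_ excludes exactly the inputs where the Python A raises IndexError: n < 0 or n > len(costs).
def Pre_min_cost_lunches (n : Int) (costs : List Int) : Prop := 0 ≤ n ∧ n ≤ (costs.length : Int)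
instance (n : Int) (costs : List Int) : Decidable (Pre_min_cost_lunches n costs) := by unfold Pre_min_cost_lunches; infer_instance
def pvWitness_min_cost_lunches : Int × List Int := (2, [150, 30])

def Spec_min_cost_lunches (n : Int) (costs : List Int) (out : Int) : Prop := out = min_cost_lunches_alt n costs
instance (n : Int) (costs : List Int) (out : Int) : Decidable (Spec_min_cost_lunches n costs out) := by unfold Spec_min_cost_lunches; infer_instance

-- ===== CLAIM (what is proved, stated in full; the proofs are below) =====
def Claim_equal_min_cost_lunches : Prop := ∀ (n : Int) (costs : List Int), Dom_min_cost_lunches n costs → Pre_min_cost_lunches n costs → Spec_min_cost_lunches n costs (min_cost_lunches n costs)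

-- ===== LEMMAS AND PROOFS =====

-- backward suffix values: pvVk costs N k j = min cost of lunches (N-k)..(N-1) given j credits
def pvVk (costs : List Int) (N : Nat) : Nat → Nat → Int
  | 0, _ => 0
  | k+1, j =>
    let c := costs.getD (N - (k+1)) 0
    let b1 := pvVk costs N k j + c
    let b2 := if 0 < j then min b1 (pvVk costs N k (j-1)) else b1
    if 100 < c then min b2 (pvVk costs N k (j+1) + c) else b2

-- ---------- Option-min algebra (none = +infinity) ----------
theorem pvOMin_none_left (a : Option Int) : pvOMin none a = a := rfl

theorem pvOMin_none_right (a : Option Int) : pvOMin a none = a := by cases a <;> rfl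

theorem pvOMin_right_comm (a b c : Option Int) :
    pvOMin (pvOMin a b) c = pvOMin (pvOMin a c) b := by
  cases a <;> cases b <;> cases c <;> simp [pvOMin, min_comm, min_assoc, min_left_comm] <;> omega

theorem pvOMin_comm (a b : Option Int) : pvOMin a b = pvOMin b a := by
  cases a <;> cases b <;> simp [pvOMin, min_comm]

theorem pvOMin_map_add (a b : Option Int) (x : Int) :
    (pvOMin a b).map (· + x) = pvOMin (a.map (· + x)) (b.map (· + x)) := by
  cases a <;> cases b <;> simp [pvOMin] <;> omega

theorem pvMap_map_add (a : Option Int) (x y : Int) :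
    (a.map (· + x)).map (· + y) = a.map (· + (x + y)) := by
  cases a <;> simp <;> omega

theorem pvMap_add_zero (a : Option Int) : a.map (· + (0:Int)) = a := by cases a <;> simp

-- the order with none = +infinity
def pvOLE (a b : Option Int) : Prop := ∀ x, b = some x → ∃ y, a = some y ∧ y ≤ x

theorem pvOLE_refl (a : Option Int) : pvOLE a a := by
  intro x hx; exact ⟨x, hx, le_refl x⟩

theorem pvOLE_trans {a b c : Option Int} (h1 : pvOLE a b) (h2 : pvOLE b c) : pvOLE a c := by
  intro x hx
  obtain ⟨y, hy, hyx⟩ := h2 x hx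
  obtain ⟨z, hz, hzy⟩ := h1 y hy
  exact ⟨z, hz, le_trans hzy hyx⟩

theorem pvOLE_none (a : Option Int) : pvOLE a none := by intro x hx; cases hx

theorem pvOLE_antisymm {a b : Option Int} (h1 : pvOLE a b) (h2 : pvOLE b a) : a = b := by
  cases a with
  | none =>
    cases b with
    | none => rfl
    | some x => obtain ⟨y, hy, _⟩ := h1 x rfl; cases hy
  | some x =>
    cases b with
    | none => obtain ⟨y, hy, _⟩ := h2 x rfl; cases hy
    | some y =>
      obtain ⟨u, hu, hu2⟩ := h1 y rfl
      obtain ⟨v, hv, hv2⟩ := h2 x rfl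
      cases hu; cases hv
      exact congrArg some (le_antisymm hu2 hv2)

theorem pvOMin_le_left (a b : Option Int) : pvOLE (pvOMin a b) a := by
  intro x hx
  cases b with
  | none => exact ⟨x, by rw [← hx, pvOMin_none_right], le_refl x⟩
  | some y =>
    cases a with
    | none => cases hx
    | some z =>
      cases hx
      exact ⟨min x y, rfl, min_le_left x y⟩

theorem pvOMin_le_right (a b : Option Int) : pvOLE (pvOMin a b) b := by
  rw [pvOMin_comm]; exact pvOMin_le_left b a

theorem pvOLE_omin {c a b : Option Int} (h1 : pvOLE c a) (h2 : pvOLE c b) : pvOLE c (pvOMin a b) := by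
  intro x hx
  cases a with
  | none => exact h2 x (by simpa [pvOMin] using hx)
  | some u =>
    cases b with
    | none => exact h1 x (by rw [pvOMin_none_right] at hx; exact hx)
    | some v =>
      simp only [pvOMin] at hx
      cases hx
      rcases min_cases u v with ⟨he, _⟩ | ⟨he, _⟩
      · obtain ⟨y, hy, hyx⟩ := h1 u rfl; exact ⟨y, hy, by omega⟩
      · obtain ⟨y, hy, hyx⟩ := h2 v rfl; exact ⟨y, hy, by omega⟩

theorem pvOLE_map_add {a b : Option Int} {x y : Int} (h : pvOLE a b) (hxy : x ≤ y) :
    pvOLE (a.map (· + x)) (b.map (· + y)) := by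
  intro z hz
  cases b with
  | none => cases hz
  | some v =>
    simp only [Option.map_some] at hz
    cases hz
    obtain ⟨u, hu, huv⟩ := h v rfl
    exact ⟨u + x, by rw [hu]; rfl, by omega⟩

theorem pvOLE_some {a : Option Int} {z v : Int} (h : pvOLE a (some z)) (hzv : z ≤ v) :
    pvOLE a (some v) := by
  intro x hx
  cases hx
  obtain ⟨y, hy, hyz⟩ := h z rfl
  exact ⟨y, hy, by omega⟩

-- ---------- folds of pvOMin ----------
theorem pvFold_le_acc (f : Nat → Option Int) :
    ∀ (js : List Nat) (a : Option Int), pvOLE (js.foldl (fun x j => pvOMin x (f j)) a) a := by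
  intro js
  induction js with
  | nil => intro a; exact pvOLE_refl a
  | cons j js ih =>
    intro a
    simp only [List.foldl_cons]
    exact pvOLE_trans (ih (pvOMin a (f j))) (pvOMin_le_left a (f j))

theorem pvFold_le_mem (f : Nat → Option Int) :
    ∀ (js : List Nat) {j : Nat}, j ∈ js → ∀ (a : Option Int),
      pvOLE (js.foldl (fun x j => pvOMin x (f j)) a) (f j) := by
  intro js
  induction js with
  | nil => intro j hj; cases hj
  | cons j' js ih =>
    intro j hj a
    simp only [List.foldl_cons]
    rcases List.mem_cons.mp hj with h | h
    · subst h
      exact pvOLE_trans (pvFold_le_acc f js (pvOMin a (f j))) (pvOMin_le_right a (f j))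
    · exact ih h (pvOMin a (f j'))

theorem pvOLE_fold (f : Nat → Option Int) :
    ∀ (js : List Nat) {m a : Option Int}, pvOLE m a → (∀ j ∈ js, pvOLE m (f j)) →
      pvOLE m (js.foldl (fun x j => pvOMin x (f j)) a) := by
  intro js
  induction js with
  | nil => intro m a ha _; exact ha
  | cons j js ih =>
    intro m a ha h
    simp only [List.foldl_cons]
    exact ih (pvOLE_omin ha (h j List.mem_cons_self)) (fun j' hj' => h j' (List.mem_cons_of_mem j hj'))

theorem pvFold_congr {f g : Nat → Option Int} :
    ∀ (js : List Nat) (a : Option Int), (∀ j ∈ js, f j = g j) →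
      js.foldl (fun x j => pvOMin x (f j)) a = js.foldl (fun x j => pvOMin x (g j)) a := by
  intro js
  induction js with
  | nil => intro a _; rfl
  | cons j js ih =>
    intro a h
    simp only [List.foldl_cons]
    rw [h j List.mem_cons_self]
    exact ih _ (fun j' hj' => h j' (List.mem_cons_of_mem j hj'))

theorem pvFold_none {f : Nat → Option Int} :
    ∀ (js : List Nat) (a : Option Int), (∀ j ∈ js, f j = none) →
      js.foldl (fun x j => pvOMin x (f j)) a = a := by
  intro js
  induction js with
  | nil => intro a _; rfl
  | cons j js ih =>
    intro a h
    simp only [List.foldl_cons]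
    rw [h j List.mem_cons_self, pvOMin_none_right]
    exact ih _ (fun j' hj' => h j' (List.mem_cons_of_mem j hj'))

-- ---------- list access helpers ----------
theorem pvGetD_eq {α : Type} (l : List α) (t : Nat) (d : α) : l.getD t d = l[t]?.getD d := by
  rw [List.getD_eq_getElem?_getD]

theorem pvGetD_map_range (f : Nat → Int) (n t : Nat) (h : t < n) :
    ((List.range n).map f).getD t 0 = f t := by
  rw [pvGetD_eq, List.getElem?_map, List.getElem?_eq_getElem (by simpa using h)]
  simp

theorem pvSet_getD_self {α : Type} (l : List α) (k : Nat) (x : α) (d : α) (h : k < l.length) :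
    (l.set k x).getD k d = x := by
  rw [pvGetD_eq, List.getElem?_set]
  simp [h]

theorem pvGetD_set_ne {α : Type} (l : List α) {k t : Nat} (x : α) (d : α) (h : k ≠ t) :
    (l.set k x).getD t d = l.getD t d := by
  rw [pvGetD_eq, pvGetD_eq, List.getElem?_set]
  simp [h]

theorem pvSet_getD_id {α : Type} (l : List α) (k : Nat) (d : α) (h : k < l.length) :
    l.set k (l.getD k d) = l := by
  apply List.ext_getElem?
  intro t
  rw [List.getElem?_set]
  by_cases hkt : k = t
  · subst hkt
    simp [h, pvGetD_eq, List.getElem?_eq_getElem h]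
  · simp [hkt]

theorem pvModify_eq_set {α : Type} (l : List α) (k : Nat) (f : α → α) (d : α) (h : k < l.length) :
    l.modify k f = l.set k (f (l.getD k d)) := by
  apply List.ext_getElem?
  intro t
  rw [List.getElem?_modify, List.getElem?_set]
  by_cases hkt : k = t
  · subst hkt
    simp [h, pvGetD_eq, List.getElem?_eq_getElem h]
  · simp [hkt]

theorem pvSet_modify_self (m : List (List (Option Int))) (k : Nat) (X : List (Option Int))
    (g : List (Option Int) → List (Option Int)) (h : k < m.length) :
    (m.set k X).modify k g = m.set k (g X) := by
  rw [pvModify_eq_set (m.set k X) k g [] (by simpa using h),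
      pvSet_getD_self m k X [] h, List.set_set]


-- ---------- B side: the backward fold computes pvVk ----------
theorem pvNextRow_step (costs : List Int) (N i : Nat) (hi : i < N) :
    pvNextRow (costs.getD i 0) ((List.range (i+2)).map (pvVk costs N (N-(i+1)))) i
      = (List.range (i+1)).map (pvVk costs N (N-i)) := by
  unfold pvNextRow
  apply List.map_congr_left
  intro j hj
  rw [List.mem_range] at hj
  have h1 : N - i = (N - (i+1)) + 1 := by omega
  rw [h1]
  have h2 : N - ((N - (i+1)) + 1) = i := by omega
  conv_rhs => rw [pvVk]
  rw [h2]
  rw [pvGetD_map_range _ _ _ (by omega), pvGetD_map_range _ _ _ (by omega),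
      pvGetD_map_range _ _ _ (by omega)]

theorem pvAltRows (costs : List Int) (N : Nat) :
    ∀ m, m ≤ N →
      (List.range m).reverse.foldl (fun row i => pvNextRow (costs.getD i 0) row i)
        ((List.range (m+1)).map (pvVk costs N (N-m)))
      = (List.range 1).map (pvVk costs N N) := by
  intro m
  induction m with
  | zero => intro _; simp
  | succ m ih =>
    intro h
    have hrev : (List.range (m+1)).reverse = m :: (List.range m).reverse := by
      rw [List.range_succ, List.reverse_append]
      rfl
    rw [hrev]
    simp only [List.foldl_cons]
    rw [show m + 1 + 1 = m + 2 by omega, pvNextRow_step costs N m (by omega)]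
    exact ih (by omega)

theorem pvAlt_val (n : Int) (costs : List Int) :
    min_cost_lunches_alt n costs = pvVk costs n.toNat n.toNat 0 := by
  have hdef : min_cost_lunches_alt n costs
      = ((List.range n.toNat).reverse.foldl (fun row i => pvNextRow (costs.getD i 0) row i)
          (List.replicate (n.toNat + 1) (0:Int))).getD 0 0 := rfl
  have h0 : List.replicate (n.toNat + 1) (0:Int)
      = (List.range (n.toNat + 1)).map (pvVk costs n.toNat (n.toNat - n.toNat)) := by
    have hf : pvVk costs n.toNat (n.toNat - n.toNat) = fun _ => (0 : Int) := by
      funext j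
      rw [Nat.sub_self]
      rfl
    rw [hf, List.map_const', List.length_range]
  rw [hdef, h0, pvAltRows costs n.toNat n.toNat le_rfl]
  rfl

-- ---------- A side: matrix fold → row recurrence ----------
-- one push step on the target row (reads the fixed source row)
def pvPush1 (c : Int) (src : List (Option Int)) (tgt : List (Option Int)) (j : Nat) : List (Option Int) :=
  match src.getD j none with
  | none => tgt
  | some v =>
    let t1 := tgt.modify j (fun old => pvOMin old (some (v + c)))
    let t2 := if 0 < j then t1.modify (j-1) (fun old => pvOMin old (some v)) else t1
    if 100 < c then t2.modify (j+1) (fun old => pvOMin old (some (v + c))) else t2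

-- row i of A's table
def pvRA (costs : List Int) (N : Nat) : Nat → List (Option Int)
  | 0 => (List.replicate (N+1) (none : Option Int)).modify 0 (fun _ => some 0)
  | i+1 => (List.range N).foldl (pvPush1 (costs.getD i 0) (pvRA costs N i)) (List.replicate (N+1) none)

theorem pvInner_step (c : Int) (i : Nat) (m : List (List (Option Int))) (j : Nat)
    (h : i + 1 < m.length) :
    pvInner c i m j = m.set (i+1) (pvPush1 c (m.getD i []) (m.getD (i+1) []) j) := by
  unfold pvInner pvPush1
  cases hv : (m.getD i []).getD j none with
  | none => rw [pvSet_getD_id m (i+1) [] h]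
  | some v =>
    simp only
    rw [pvModify_eq_set m (i+1) _ [] h]
    by_cases hj : 0 < j <;> by_cases hc : 100 < c <;>
      simp only [hj, hc, if_true, if_false] <;>
      (repeat rw [pvSet_modify_self m (i+1) _ _ h]) <;>
      try rfl

theorem pvInnerFold (c : Int) (i : Nat) :
    ∀ (js : List Nat) (m : List (List (Option Int))), i + 1 < m.length →
      js.foldl (pvInner c i) m
        = m.set (i+1) (js.foldl (pvPush1 c (m.getD i [])) (m.getD (i+1) [])) := by
  intro js
  induction js with
  | nil => intro m h; simp only [List.foldl_nil]; rw [pvSet_getD_id m (i+1) [] h]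
  | cons j js ih =>
    intro m h
    simp only [List.foldl_cons]
    rw [pvInner_step c i m j h]
    rw [ih _ (by simpa using h)]
    rw [pvGetD_set_ne m _ [] (by omega), pvSet_getD_self m (i+1) _ [] h, List.set_set]

-- the matrix after t outer iterations
def pvMat (costs : List Int) (N t : Nat) : List (List (Option Int)) :=
  (List.range (N+1)).map (fun k => if k ≤ t then pvRA costs N k else List.replicate (N+1) none)

theorem pvMat_length (costs : List Int) (N t : Nat) : (pvMat costs N t).length = N + 1 := by
  simp [pvMat]

theorem pvMat_getD (costs : List Int) (N t k : Nat) (hk : k ≤ N) :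
    (pvMat costs N t).getD k []
      = if k ≤ t then pvRA costs N k else List.replicate (N+1) none := by
  rw [pvGetD_eq, pvMat, List.getElem?_map,
      List.getElem?_eq_getElem (by simpa using Nat.lt_succ_of_le hk)]
  simp

theorem pvMat_set (costs : List Int) (N t : Nat) (h : t + 1 ≤ N) :
    (pvMat costs N t).set (t+1) (pvRA costs N (t+1)) = pvMat costs N (t+1) := by
  apply List.ext_getElem?
  intro u
  rw [List.getElem?_set]
  by_cases he : t + 1 = u
  · subst he
    rw [if_pos rfl, if_pos (by rw [pvMat_length]; omega)]
    unfold pvMat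
    rw [List.getElem?_map, List.getElem?_eq_getElem (l := List.range (N+1)) (by simp; omega)]
    simp only [List.getElem_range, Option.map_some]
    rw [if_pos le_rfl]
  · rw [if_neg he]
    unfold pvMat
    rw [List.getElem?_map, List.getElem?_map]
    by_cases hu : u < N + 1
    · rw [List.getElem?_eq_getElem (l := List.range (N+1)) (by simpa using hu)]
      simp only [List.getElem_range, Option.map_some]
      rw [if_congr (show (u ≤ t) ↔ (u ≤ t + 1) by omega) rfl rfl]
    · rw [List.getElem?_eq_none (l := List.range (N+1)) (by simp; omega)]
      rfl

theorem pvOuter (costs : List Int) (N : Nat) :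
    ∀ t, t ≤ N →
      (List.range t).foldl (fun m i => (List.range N).foldl (pvInner (costs.getD i 0) i) m)
        ((List.replicate (N+1) (List.replicate (N+1) (none : Option Int))).modify 0
          (fun row => row.modify 0 (fun _ => some (0:Int))))
      = pvMat costs N t := by
  intro t
  induction t with
  | zero =>
    intro _
    simp only [List.range_zero, List.foldl_nil]
    apply List.ext_getElem?
    intro u
    rw [List.getElem?_modify]
    unfold pvMat
    rw [List.getElem?_map]
    by_cases hu : u < N + 1
    · rw [List.getElem?_eq_getElem (l := List.range (N+1)) (by simpa using hu),
          List.getElem?_eq_getElem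
            (l := List.replicate (N+1) (List.replicate (N+1) (none : Option Int)))
            (by simpa using hu)]
      by_cases h0 : u = 0
      · subst h0
        simp [pvRA]
      · simp [h0, Ne.symm h0]
    · have h1 : N + 1 ≤ u := Nat.le_of_not_lt hu
      rw [List.getElem?_eq_none (by simpa using h1), List.getElem?_eq_none (by simpa using h1)]
      rfl
  | succ t ih =>
    intro h
    rw [List.range_succ, List.foldl_append]
    rw [ih (by omega)]
    simp only [List.foldl_cons, List.foldl_nil]
    rw [pvInnerFold (costs.getD t 0) t (List.range N) (pvMat costs N t)
        (by rw [pvMat_length]; omega)]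
    rw [pvMat_getD costs N t t (by omega), pvMat_getD costs N t (t+1) (by omega)]
    rw [if_pos le_rfl, if_neg (by omega)]
    rw [show (List.range N).foldl (pvPush1 (costs.getD t 0) (pvRA costs N t))
          (List.replicate (N+1) none) = pvRA costs N (t+1) from rfl]
    exact pvMat_set costs N t h

-- ---------- per-cell characterization of the push row ----------
def pvContrib (c : Int) (src : List (Option Int)) (j t : Nat) : Option Int :=
  (src.getD j none).bind (fun v =>
    if t = j then some (v + c)
    else if j = t + 1 then some v
    else if t = j + 1 ∧ 100 < c then some (v + c) else none)

theorem pvPush1_cell (c : Int) (src tgt : List (Option Int)) (j t : Nat) :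
    (pvPush1 c src tgt j)[t]? = tgt[t]?.map (fun old => pvOMin old (pvContrib c src j t)) := by
  unfold pvPush1 pvContrib
  cases hv : src.getD j none with
  | none =>
    cases tgt[t]? <;> simp [pvOMin_none_right]
  | some v =>
    simp only
    by_cases hj : 0 < j <;> by_cases hc : 100 < c <;>
      simp only [hj, hc, if_true, if_false, and_true, and_false, Option.bind_some] <;>
      simp only [List.getElem?_modify] <;>
      cases htgt : tgt[t]? <;>
      simp only [Option.map_none, Option.map_some] <;>
      first
      | rfl
      | (split_ifs <;>
          first
          | rfl
          | omega
          | simp [pvOMin_none_right]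
          | (exfalso; omega))

theorem pvPushFold_cell (c : Int) (src : List (Option Int)) (t : Nat) :
    ∀ (js : List Nat) (tgt : List (Option Int)),
      (js.foldl (pvPush1 c src) tgt)[t]?
        = tgt[t]?.map (fun old => js.foldl (fun a j => pvOMin a (pvContrib c src j t)) old) := by
  intro js
  induction js with
  | nil =>
    intro tgt
    simp only [List.foldl_nil]
    cases tgt[t]? <;> rfl
  | cons j js ih =>
    intro tgt
    simp only [List.foldl_cons]
    rw [ih, pvPush1_cell, Option.map_map]
    rfl

theorem pvContrib_none (c : Int) (src : List (Option Int)) (j t : Nat)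
    (h1 : ¬ t = j) (h2 : ¬ j = t + 1) (h3 : ¬ t = j + 1) : pvContrib c src j t = none := by
  unfold pvContrib
  cases src.getD j none with
  | none => rfl
  | some v => simp only [Option.bind_some]; simp [h1, h2, h3]

theorem pvContrib_pay (c : Int) (src : List (Option Int)) (t : Nat) :
    pvContrib c src t t = (src.getD t none).map (· + c) := by
  unfold pvContrib
  cases src.getD t none with
  | none => rfl
  | some v => simp

theorem pvContrib_free (c : Int) (src : List (Option Int)) (t : Nat) :
    pvContrib c src (t+1) t = src.getD (t+1) none := by
  unfold pvContrib
  cases src.getD (t+1) none with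
  | none => rfl
  | some v =>
    simp only [Option.bind_some]
    rw [if_neg (show ¬ (t = t + 1) by omega)]
    simp

theorem pvContrib_exp (c : Int) (src : List (Option Int)) (t : Nat) (ht : 0 < t) :
    pvContrib c src (t-1) t = if 100 < c then (src.getD (t-1) none).map (· + c) else none := by
  unfold pvContrib
  cases src.getD (t-1) none with
  | none => split_ifs <;> rfl
  | some v =>
    simp only [Option.bind_some, Option.map_some]
    rw [if_neg (show ¬ (t = t - 1) by omega), if_neg (show ¬ (t - 1 = t + 1) by omega),
        if_congr (show (t = t - 1 + 1 ∧ 100 < c) ↔ (100 < c) by omega) rfl rfl]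

theorem pvFoldContrib (c : Int) (src : List (Option Int)) (t : Nat) :
    ∀ (n : Nat),
      (List.range n).foldl (fun a j => pvOMin a (pvContrib c src j t)) none
      = pvOMin (pvOMin (if 0 < t ∧ t - 1 < n then pvContrib c src (t-1) t else none)
                       (if t < n then pvContrib c src t t else none))
               (if t + 1 < n then pvContrib c src (t+1) t else none) := by
  intro n
  induction n with
  | zero =>
    rw [if_neg (show ¬ (0 < t ∧ t - 1 < 0) by omega),
        if_neg (show ¬ (t < 0) by omega), if_neg (show ¬ (t + 1 < 0) by omega)]
    rfl
  | succ n ih =>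
    rw [List.range_succ, List.foldl_append]
    simp only [List.foldl_cons, List.foldl_nil]
    rw [ih]
    by_cases hA : n + 1 = t
    · -- the new source n is t - 1 : the expensive contribution appears
      have hn : n = t - 1 := by omega
      have ht : 0 < t := by omega
      rw [hn]
      rw [if_neg (show ¬ (0 < t ∧ t - 1 < t - 1) by omega),
          if_neg (show ¬ (t < t - 1) by omega),
          if_neg (show ¬ (t + 1 < t - 1) by omega),
          if_pos (show 0 < t ∧ t - 1 < t - 1 + 1 by omega),
          if_neg (show ¬ (t < t - 1 + 1) by omega),
          if_neg (show ¬ (t + 1 < t - 1 + 1) by omega)]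
      simp only [pvOMin_none_left, pvOMin_none_right]
    · by_cases hB : n = t
      · rw [hB]
        rw [if_congr (show (0 < t ∧ t - 1 < t) ↔ (0 < t) by omega) rfl rfl,
            if_neg (show ¬ (t < t) by omega),
            if_neg (show ¬ (t + 1 < t) by omega),
            if_congr (show (0 < t ∧ t - 1 < t + 1) ↔ (0 < t) by omega) rfl rfl,
            if_pos (show t < t + 1 by omega),
            if_neg (show ¬ (t + 1 < t + 1) by omega)]
        simp only [pvOMin_none_left, pvOMin_none_right]
      · by_cases hC : n = t + 1
        · rw [hC]
          rw [if_congr (show (0 < t ∧ t - 1 < t + 1) ↔ (0 < t) by omega) rfl rfl,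
              if_pos (show t < t + 1 by omega),
              if_neg (show ¬ (t + 1 < t + 1) by omega),
              if_congr (show (0 < t ∧ t - 1 < t + 1 + 1) ↔ (0 < t) by omega) rfl rfl,
              if_pos (show t < t + 1 + 1 by omega),
              if_pos (show t + 1 < t + 1 + 1 by omega)]
          simp only [pvOMin_none_left, pvOMin_none_right]
        · rw [pvContrib_none c src n t (show ¬ (t = n) by omega) (show ¬ (n = t + 1) by omega)
              (show ¬ (t = n + 1) by omega), pvOMin_none_right]
          rw [if_congr (show (0 < t ∧ t - 1 < n) ↔ (0 < t ∧ t - 1 < n + 1) by omega) rfl rfl,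
              if_congr (show (t < n) ↔ (t < n + 1) by omega) rfl rfl,
              if_congr (show (t + 1 < n) ↔ (t + 1 < n + 1) by omega) rfl rfl]

-- ---------- the clean forward recurrence ----------
def pvG (costs : List Int) : Nat → Nat → Option Int
  | 0, j => if j = 0 then some 0 else none
  | i+1, j =>
    let c := costs.getD i 0
    pvOMin (pvOMin ((pvG costs i j).map (· + c)) (pvG costs i (j+1)))
           (if 100 < c ∧ 0 < j then (pvG costs i (j-1)).map (· + c) else none)

theorem pvG_succ (costs : List Int) (i t : Nat) :
    pvG costs (i+1) t
      = pvOMin (pvOMin ((pvG costs i t).map (· + costs.getD i 0)) (pvG costs i (t+1)))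
               (if 100 < costs.getD i 0 ∧ 0 < t then (pvG costs i (t-1)).map (· + costs.getD i 0) else none) := rfl

theorem pvG_vanish (costs : List Int) : ∀ i j, i < j → pvG costs i j = none := by
  intro i
  induction i with
  | zero =>
    intro j hj
    simp only [pvG]
    rw [if_neg (by omega)]
  | succ i ih =>
    intro j hj
    rw [pvG_succ]
    rw [ih j (by omega), ih (j+1) (by omega)]
    have he : (if 100 < costs.getD i 0 ∧ 0 < j then (pvG costs i (j-1)).map (· + costs.getD i 0) else none) = none := by
      split_ifs with hg
      · rw [ih (j-1) (by omega)]; rfl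
      · rfl
    rw [he]
    rfl

theorem pvRA_G (costs : List Int) (N : Nat) :
    ∀ i, i ≤ N → ∀ t, t ≤ N → (pvRA costs N i).getD t none = pvG costs i t := by
  intro i
  induction i with
  | zero =>
    intro _ t ht
    rw [pvGetD_eq]
    unfold pvRA
    rw [List.getElem?_modify]
    rw [List.getElem?_eq_getElem (l := List.replicate (N+1) (none : Option Int))
        (by simpa using Nat.lt_succ_of_le ht)]
    by_cases h0 : t = 0
    · subst h0
      simp [pvG]
    · simp [pvG, h0, Ne.symm h0]
  | succ i ih =>
    intro hi t ht
    have hiN : i < N := by omega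
    have hcell : (pvRA costs N (i+1)).getD t none
        = pvOMin (pvOMin (if 0 < t ∧ t - 1 < N then pvContrib (costs.getD i 0) (pvRA costs N i) (t-1) t else none)
                         (if t < N then pvContrib (costs.getD i 0) (pvRA costs N i) t t else none))
                 (if t + 1 < N then pvContrib (costs.getD i 0) (pvRA costs N i) (t+1) t else none) := by
      rw [pvGetD_eq]
      show ((List.range N).foldl (pvPush1 (costs.getD i 0) (pvRA costs N i)) (List.replicate (N+1) none))[t]?.getD none = _
      rw [pvPushFold_cell]
      rw [List.getElem?_eq_getElem (l := List.replicate (N+1) (none : Option Int))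
          (by simpa using Nat.lt_succ_of_le ht)]
      rw [List.getElem_replicate]
      simp only [Option.map_some, Option.getD_some]
      rw [pvFoldContrib]
    rw [hcell, pvG_succ]
    have hB : (if t < N then pvContrib (costs.getD i 0) (pvRA costs N i) t t else none)
        = (pvG costs i t).map (· + costs.getD i 0) := by
      by_cases htN : t < N
      · rw [if_pos htN, pvContrib_pay,
            show (pvRA costs N i).getD t none = pvG costs i t from ih (by omega) t ht]
      · rw [if_neg htN]
        rw [show t = N by omega, pvG_vanish costs i N (by omega)]
        rfl
    have hC : (if t + 1 < N then pvContrib (costs.getD i 0) (pvRA costs N i) (t+1) t else none)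
        = pvG costs i (t+1) := by
      by_cases ht1 : t + 1 < N
      · rw [if_pos ht1, pvContrib_free,
            show (pvRA costs N i).getD (t+1) none = pvG costs i (t+1) from ih (by omega) (t+1) (by omega)]
      · rw [if_neg ht1, pvG_vanish costs i (t+1) (by omega)]
    have hA : (if 0 < t ∧ t - 1 < N then pvContrib (costs.getD i 0) (pvRA costs N i) (t-1) t else none)
        = (if 100 < costs.getD i 0 ∧ 0 < t then (pvG costs i (t-1)).map (· + costs.getD i 0) else none) := by
      by_cases ht0 : 0 < t
      · rw [if_pos (show 0 < t ∧ t - 1 < N by omega), pvContrib_exp _ _ _ ht0,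
            show (pvRA costs N i).getD (t-1) none = pvG costs i (t-1) from ih (by omega) (t-1) (by omega)]
        rw [if_congr (show (100 < costs.getD i 0) ↔ (100 < costs.getD i 0 ∧ 0 < t) by
              constructor
              · intro h; exact ⟨h, ht0⟩
              · intro h; exact h.1) rfl rfl]
      · rw [if_neg (show ¬ (0 < t ∧ t - 1 < N) by omega),
            if_neg (show ¬ (100 < costs.getD i 0 ∧ 0 < t) by omega)]
    rw [hA, hB, hC]
    rw [pvOMin_comm (if 100 < costs.getD i 0 ∧ 0 < t then (pvG costs i (t-1)).map (· + costs.getD i 0) else none)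
        ((pvG costs i t).map (· + costs.getD i 0))]
    rw [pvOMin_right_comm]

-- ---------- pvVk facts ----------
theorem pvVk_le_pay (costs : List Int) (N k j : Nat) :
    pvVk costs N (k+1) j ≤ pvVk costs N k j + costs.getD (N-(k+1)) 0 := by
  rw [pvVk]
  split_ifs <;> omega

theorem pvVk_le_free (costs : List Int) (N k j : Nat) (hj : 0 < j) :
    pvVk costs N (k+1) j ≤ pvVk costs N k (j-1) := by
  rw [pvVk]
  split_ifs <;> omega

theorem pvVk_le_exp (costs : List Int) (N k j : Nat) (hc : 100 < costs.getD (N-(k+1)) 0) :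
    pvVk costs N (k+1) j ≤ pvVk costs N k (j+1) + costs.getD (N-(k+1)) 0 := by
  rw [pvVk]
  split_ifs <;> omega

theorem pvVk_cases (costs : List Int) (N k j : Nat) :
    pvVk costs N (k+1) j = pvVk costs N k j + costs.getD (N-(k+1)) 0
    ∨ (0 < j ∧ pvVk costs N (k+1) j = pvVk costs N k (j-1))
    ∨ (100 < costs.getD (N-(k+1)) 0 ∧ pvVk costs N (k+1) j = pvVk costs N k (j+1) + costs.getD (N-(k+1)) 0) := by
  rw [pvVk]
  split_ifs <;> omega

-- ---------- duality between the two recurrences ----------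
def pvTerm (costs : List Int) (N i j : Nat) : Option Int :=
  (pvG costs i j).map (· + pvVk costs N (N - i) j)

def pvM (costs : List Int) (N i : Nat) : Option Int :=
  (List.range (N+1)).foldl (fun a j => pvOMin a (pvTerm costs N i j)) none

theorem pvM_le_term (costs : List Int) (N i j : Nat) (hj : j ≤ N) :
    pvOLE (pvM costs N i) (pvTerm costs N i j) :=
  pvFold_le_mem _ (List.range (N+1)) (List.mem_range.mpr (by omega)) none

theorem pvTerm_succ (costs : List Int) (N i j : Nat) :
    pvTerm costs N (i+1) j
      = pvOMin (pvOMin ((pvG costs i j).map (· + (costs.getD i 0 + pvVk costs N (N-(i+1)) j)))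
                       ((pvG costs i (j+1)).map (· + pvVk costs N (N-(i+1)) j)))
               (if 100 < costs.getD i 0 ∧ 0 < j then
                  (pvG costs i (j-1)).map (· + (costs.getD i 0 + pvVk costs N (N-(i+1)) j)) else none) := by
  unfold pvTerm
  rw [pvG_succ, pvOMin_map_add, pvOMin_map_add, pvMap_map_add]
  congr 1
  split_ifs with h
  · rw [pvMap_map_add]
  · rfl

theorem pvM_step (costs : List Int) (N i : Nat) (hi : i < N) :
    pvM costs N (i+1) = pvM costs N i := by
  have hki : N - i = (N - (i+1)) + 1 := by omega
  have hik : N - ((N - (i+1)) + 1) = i := by omega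
  apply pvOLE_antisymm
  · -- every old term dominates something in the new fold
    apply pvOLE_fold _ _ (pvOLE_none _)
    intro j hj
    rw [List.mem_range] at hj
    cases hg : pvG costs i j with
    | none =>
      intro x hx
      unfold pvTerm at hx
      rw [hg] at hx
      cases hx
    | some w =>
      have hji : j ≤ i := by
        by_contra hcon
        rw [pvG_vanish costs i j (by omega)] at hg
        cases hg
      have hterm : pvTerm costs N i j = some (w + pvVk costs N ((N-(i+1))+1) j) := by
        unfold pvTerm
        rw [hg, hki]
        rfl
      rw [hterm]
      rcases pvVk_cases costs N (N-(i+1)) j with hcase | ⟨hj0, hcase⟩ | ⟨hc100, hcase⟩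
      · -- pay
        have hle : pvOLE (pvG costs (i+1) j) ((pvG costs i j).map (· + costs.getD i 0)) := by
          rw [pvG_succ]
          exact pvOLE_trans (pvOMin_le_left _ _) (pvOMin_le_left _ _)
        rw [hg] at hle
        have h2 := pvOLE_map_add (y := pvVk costs N (N-(i+1)) j) hle le_rfl
        have h3 : pvOLE (pvTerm costs N (i+1) j) (some (w + costs.getD i 0 + pvVk costs N (N-(i+1)) j)) := by
          unfold pvTerm
          exact h2
        apply pvOLE_some (pvOLE_trans (pvM_le_term costs N (i+1) j (by omega)) h3)
        rw [hcase, hik]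
        omega
      · -- free
        have hle : pvOLE (pvG costs (i+1) (j-1)) (pvG costs i ((j-1)+1)) := by
          rw [pvG_succ]
          exact pvOLE_trans (pvOMin_le_left _ _) (pvOMin_le_right _ _)
        rw [show j - 1 + 1 = j from by omega, hg] at hle
        have h2 := pvOLE_map_add (y := pvVk costs N (N-(i+1)) (j-1)) hle le_rfl
        have h3 : pvOLE (pvTerm costs N (i+1) (j-1)) (some (w + pvVk costs N (N-(i+1)) (j-1))) := by
          unfold pvTerm
          exact h2
        apply pvOLE_some (pvOLE_trans (pvM_le_term costs N (i+1) (j-1) (by omega)) h3)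
        rw [hcase]
      · -- expensive
        rw [hik] at hc100
        have hle : pvOLE (pvG costs (i+1) (j+1)) ((pvG costs i ((j+1)-1)).map (· + costs.getD i 0)) := by
          rw [pvG_succ]
          rw [if_pos ⟨hc100, by omega⟩]
          exact pvOMin_le_right _ _
        rw [show j + 1 - 1 = j from by omega, hg] at hle
        have h2 := pvOLE_map_add (y := pvVk costs N (N-(i+1)) (j+1)) hle le_rfl
        have h3 : pvOLE (pvTerm costs N (i+1) (j+1)) (some (w + costs.getD i 0 + pvVk costs N (N-(i+1)) (j+1))) := by
          unfold pvTerm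
          exact h2
        apply pvOLE_some (pvOLE_trans (pvM_le_term costs N (i+1) (j+1) (by omega)) h3)
        rw [hcase, hik]
        omega
  · -- every new term dominates something in the old fold
    apply pvOLE_fold _ _ (pvOLE_none _)
    intro j hj
    rw [List.mem_range] at hj
    rw [pvTerm_succ costs N i j]
    apply pvOLE_omin
    apply pvOLE_omin
    · -- pay piece
      have h1 : pvOLE (pvTerm costs N i j)
          ((pvG costs i j).map (· + (costs.getD i 0 + pvVk costs N (N-(i+1)) j))) := by
        unfold pvTerm
        rw [hki]
        apply pvOLE_map_add (pvOLE_refl _)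
        have h2 := pvVk_le_pay costs N (N-(i+1)) j
        rw [hik] at h2
        omega
      exact pvOLE_trans (pvM_le_term costs N i j (by omega)) h1
    · -- free piece
      by_cases hjN : j + 1 ≤ N
      · have h1 : pvOLE (pvTerm costs N i (j+1))
            ((pvG costs i (j+1)).map (· + pvVk costs N (N-(i+1)) j)) := by
          unfold pvTerm
          rw [hki]
          apply pvOLE_map_add (pvOLE_refl _)
          have h2 := pvVk_le_free costs N (N-(i+1)) (j+1) (by omega)
          rw [show j + 1 - 1 = j from by omega] at h2
          exact h2
        exact pvOLE_trans (pvM_le_term costs N i (j+1) hjN) h1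
      · rw [pvG_vanish costs i (j+1) (by omega)]
        intro x hx
        cases hx
    · -- expensive piece
      split_ifs with hg
      · obtain ⟨hc100, hj0⟩ := hg
        have h1 : pvOLE (pvTerm costs N i (j-1))
            ((pvG costs i (j-1)).map (· + (costs.getD i 0 + pvVk costs N (N-(i+1)) j))) := by
          unfold pvTerm
          rw [hki]
          apply pvOLE_map_add (pvOLE_refl _)
          have h2 := pvVk_le_exp costs N (N-(i+1)) (j-1) (by rw [hik]; exact hc100)
          rw [show j - 1 + 1 = j from by omega, hik] at h2
          omega
        exact pvOLE_trans (pvM_le_term costs N i (j-1) (by omega)) h1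
      · exact pvOLE_none _

theorem pvM_zero (costs : List Int) (N : Nat) : pvM costs N 0 = some (pvVk costs N N 0) := by
  unfold pvM
  rw [List.range_succ_eq_map]
  simp only [List.foldl_cons]
  have h0 : pvOMin none (pvTerm costs N 0 0) = some (pvVk costs N N 0) := by
    unfold pvTerm
    show pvOMin none ((pvG costs 0 0).map (· + pvVk costs N (N - 0) 0)) = _
    rw [show pvG costs 0 0 = some 0 from rfl, Nat.sub_zero]
    show some (0 + pvVk costs N N 0) = some (pvVk costs N N 0)
    rw [Int.zero_add]
  rw [h0]
  apply pvFold_none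
  intro j hj
  rw [List.mem_map] at hj
  obtain ⟨a, _, ha⟩ := hj
  unfold pvTerm
  rw [show pvG costs 0 j = if j = 0 then some 0 else none from rfl, if_neg (by omega)]
  rfl

theorem pvM_all (costs : List Int) (N : Nat) :
    ∀ i, i ≤ N → pvM costs N i = some (pvVk costs N N 0) := by
  intro i
  induction i with
  | zero => intro _; exact pvM_zero costs N
  | succ i ih =>
    intro h
    rw [pvM_step costs N i (by omega)]
    exact ih (by omega)

theorem pvA_val (n : Int) (costs : List Int) :
    min_cost_lunches n costs = pvVk costs n.toNat n.toNat 0 := by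
  have hdef : min_cost_lunches n costs
      = ((List.range (n.toNat+1)).foldl (fun acc j => pvOMin acc
          ((((List.range n.toNat).foldl (fun m i => (List.range n.toNat).foldl (pvInner (costs.getD i 0) i) m)
              ((List.replicate (n.toNat+1) (List.replicate (n.toNat+1) (none : Option Int))).modify 0
                (fun row => row.modify 0 (fun _ => some (0:Int))))).getD n.toNat []).getD j none)) none).getD 0 := rfl
  rw [hdef]
  rw [pvOuter costs n.toNat n.toNat le_rfl]
  rw [pvMat_getD costs n.toNat n.toNat n.toNat le_rfl, if_pos le_rfl]
  have hfold : (List.range (n.toNat+1)).foldl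
      (fun acc j => pvOMin acc ((pvRA costs n.toNat n.toNat).getD j none)) none
      = pvM costs n.toNat n.toNat := by
    unfold pvM
    apply pvFold_congr
    intro j hj
    rw [List.mem_range] at hj
    rw [pvRA_G costs n.toNat n.toNat le_rfl j (by omega)]
    unfold pvTerm
    rw [Nat.sub_self]
    rw [show pvVk costs n.toNat 0 j = 0 from rfl, pvMap_add_zero]
  rw [hfold, pvM_all costs n.toNat n.toNat le_rfl]
  rfl

-- ===== VERDICT (by name: the statement is the Claim_ definition above) =====
theorem min_cost_lunches_spec : Claim_equal_min_cost_lunches := by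
  intro n costs _ _
  unfold Spec_min_cost_lunches
  rw [pvA_val n costs, pvAlt_val n costs]
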